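-- pv_equiv track=rewrite | github.com/juniorcoder2008/python-binary-calculator | CalculateBinaryNumbers.py | calculateBinaryNumbers
-- ===== SOURCE A (Python) =====
-- def calculateBinaryNumbers(binaryString: str):
--     outputInteger: int = 0
--     counter: int = 0
--
--     if len(binaryString) < 8:
--         return
--
--     if len(binaryString) > 8:
--         return
--
--     for i in binaryString:
--         if not i == "1" and not i == "0":
--             return
--
--         if counter == 0:
--             if i == "1":
--                 outputInteger += 128
--             else:
--                 outputInteger += 0
--
--         if counter == 1:
--             if i == "1":
--                 outputInteger += 64
--             else:
--                 outputInteger += 0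
--
--         if counter == 2:
--             if i == "1":
--                 outputInteger += 32
--             else:
--                 outputInteger += 0
--
--         if counter == 3:
--             if i == "1":
--                 outputInteger += 16
--             else:
--                 outputInteger += 0
--
--         if counter == 4:
--             if i == "1":
--                 outputInteger += 8
--             else:
--                 outputInteger += 0
--
--         if counter == 5:
--             if i == "1":
--                 outputInteger += 4
--             else:
--                 outputInteger += 0
--
--         if counter == 6:
--             if i == "1":
--                 outputInteger += 2
--             else:
--                 outputInteger += 0
--
--         if counter == 7:
--             if i == "1":
--                 outputInteger += 1
--             else:
--                 outputInteger += 0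
--
--         counter += 1
--
--     return outputInteger
-- ===== SOURCE B (Python) =====
-- def calculateBinaryNumbers(binaryString: str):
--     if len(binaryString) != 8:
--         return None
--     value = 0
--     for ch in binaryString:
--         if ch == "1":
--             value = value * 2 + 1
--         elif ch == "0":
--             value = value * 2
--         else:
--             return None
--     return value
-- ===== Notes on version B (the rewrite author's own statement) =====
-- stated objective: simpler
-- what changed: Replaces the counter-indexed chain of eight fixed-weight if-blocks with a single up-front length check and one Horner-style shift-and-add accumulation over the characters.
import Mathlib
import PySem

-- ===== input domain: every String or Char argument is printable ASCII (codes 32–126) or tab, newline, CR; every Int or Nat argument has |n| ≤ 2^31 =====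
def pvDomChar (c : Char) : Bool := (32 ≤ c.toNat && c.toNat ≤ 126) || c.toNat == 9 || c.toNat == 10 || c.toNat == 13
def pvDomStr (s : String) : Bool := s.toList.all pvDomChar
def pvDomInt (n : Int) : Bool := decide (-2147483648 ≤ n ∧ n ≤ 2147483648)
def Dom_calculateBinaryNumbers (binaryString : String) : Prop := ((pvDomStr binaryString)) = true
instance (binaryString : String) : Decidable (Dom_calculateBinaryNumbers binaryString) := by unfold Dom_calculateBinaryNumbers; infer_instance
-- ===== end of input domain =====

-- ===== PORT A =====
-- One honest line: B validates the length up front and accumulates the value by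
-- Horner shift-and-add in a single loop, instead of A's counter-indexed chain of
-- eight fixed-weight if-blocks; objective: simpler.

-- loop body of A: the eight successive 'if counter == k' blocks, in order
def stepA (counter : Int) (i : Char) (acc : Int) : Int :=
  let a0 := if counter == 0 then (if i == '1' then acc + 128 else acc + 0) else acc
  let a1 := if counter == 1 then (if i == '1' then a0 + 64 else a0 + 0) else a0
  let a2 := if counter == 2 then (if i == '1' then a1 + 32 else a1 + 0) else a1
  let a3 := if counter == 3 then (if i == '1' then a2 + 16 else a2 + 0) else a2
  let a4 := if counter == 4 then (if i == '1' then a3 + 8 else a3 + 0) else a3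
  let a5 := if counter == 5 then (if i == '1' then a4 + 4 else a4 + 0) else a4
  let a6 := if counter == 6 then (if i == '1' then a5 + 2 else a5 + 0) else a5
  let a7 := if counter == 7 then (if i == '1' then a6 + 1 else a6 + 0) else a6
  a7

-- A's for-loop: early 'return' (= none) on a non-bit char, else step and continue
def loopA : List Char → Int → Int → Option Int
  | [], _, acc => some acc
  | i :: t, counter, acc =>
    if ¬ (i == '1') = true ∧ ¬ (i == '0') = true then none
    else loopA t (counter + 1) (stepA counter i acc)

def calculateBinaryNumbers (binaryString : String) : Option Int :=
  if PySem.Str.len binaryString < 8 then none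
  else if PySem.Str.len binaryString > 8 then none
  else loopA binaryString.toList 0 0

-- ===== PORT B =====
-- B's loop: Horner shift-and-add, early None on a non-bit char
def loopB : List Char → Int → Option Int
  | [], value => some value
  | ch :: t, value =>
    if ch == '1' then loopB t (value * 2 + 1)
    else if ch == '0' then loopB t (value * 2)
    else none

def calculateBinaryNumbers_alt (binaryString : String) : Option Int :=
  if PySem.Str.len binaryString ≠ 8 then none
  else loopB binaryString.toList 0

-- ===== PRECONDITION & SPEC =====
def Spec_calculateBinaryNumbers (binaryString : String) (out : Option Int) : Prop := out = calculateBinaryNumbers_alt binaryString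
instance (binaryString : String) (out : Option Int) : Decidable (Spec_calculateBinaryNumbers binaryString out) := by unfold Spec_calculateBinaryNumbers; infer_instance

-- ===== CLAIM (what is proved, stated in full; the proofs are below) =====
def Claim_equal_calculateBinaryNumbers : Prop := ∀ (binaryString : String), Dom_calculateBinaryNumbers binaryString → Spec_calculateBinaryNumbers binaryString (calculateBinaryNumbers binaryString)

-- ===== LEMMAS AND PROOFS =====

-- B's loop with accumulator h equals its result from 0, shifted by h * 2^len
theorem loopB_shift (l : List Char) (h : Int) :
    loopB l h = (loopB l 0).map (fun r => h * 2 ^ l.length + r) := by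
  induction l generalizing h with
  | nil => simp [loopB]
  | cons c t ih =>
    by_cases h1 : c = '1'
    · subst h1
      simp only [loopB, if_pos (by decide : ('1' == '1') = true)]
      rw [ih (h * 2 + 1), ih (0 * 2 + 1), Option.map_map]
      apply congrArg (fun f => Option.map f (loopB t 0))
      funext r
      simp only [Function.comp, List.length_cons, pow_succ]
      ring
    · by_cases h0 : c = '0'
      · subst h0
        simp only [loopB, if_neg (by decide : ¬ ('0' == '1') = true),
          if_pos (by decide : ('0' == '0') = true)]
        rw [ih (h * 2), ih (0 * 2), Option.map_map]
        apply congrArg (fun f => Option.map f (loopB t 0))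
        funext r
        simp only [Function.comp, List.length_cons, pow_succ]
        ring
      · simp [loopB, h0, h1]

-- stepA at counter c ∈ [0,7] adds the weight 2^(7-c) for a '1' and nothing for a non-'1'
theorem stepA_one (c : Int) (acc : Int) (hc0 : 0 ≤ c) (hc7 : c ≤ 7) :
    stepA c '1' acc = acc + 2 ^ (7 - c.toNat) := by
  interval_cases c <;> simp [stepA]

theorem stepA_zero (acc : Int) (c : Int) (i : Char) (hi : i ≠ '1') :
    stepA c i acc = acc := by
  simp [stepA, beq_iff_eq, hi]

-- main invariant: with counter c and c + len = 8, A's loop equals B's loop shifted by acc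
theorem loopA_eq_loopB (l : List Char) (c acc : Int) (hc : 0 ≤ c)
    (hlen : c + l.length = 8) :
    loopA l c acc = (loopB l 0).map (fun r => acc + r) := by
  induction l generalizing c acc with
  | nil => simp [loopA, loopB]
  | cons i t ih =>
    have hc7 : c ≤ 7 := by
      have := hlen; simp only [List.length_cons] at this; omega
    have htlen : (t.length : Int) = 7 - c := by
      have := hlen; simp only [List.length_cons] at this; push_cast at this ⊢; omega
    by_cases h1 : i = '1'
    · subst h1
      simp only [loopA, loopB, if_pos (by decide : ('1' == '1') = true)]
      rw [if_neg (by simp)]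
      rw [ih (c + 1) _ (by omega) (by simp only [List.length_cons] at hlen; push_cast at hlen ⊢; omega)]
      rw [loopB_shift t (0 * 2 + 1), Option.map_map]
      apply congrArg (fun f => Option.map f (loopB t 0))
      funext r
      have h2 : (2 : Int) ^ t.length = 2 ^ (7 - c.toNat) := by
        congr 1
        omega
      simp only [Function.comp, stepA_one c acc hc hc7, h2]
      ring
    · by_cases h0 : i = '0'
      · subst h0
        simp only [loopA, loopB, if_neg (by decide : ¬ ('0' == '1') = true),
          if_pos (by decide : ('0' == '0') = true)]
        rw [if_neg (by simp)]
        rw [stepA_zero acc c '0' (by decide)]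
        exact ih (c + 1) acc (by omega)
          (by simp only [List.length_cons] at hlen; push_cast at hlen ⊢; omega)
      · simp [loopA, loopB, h0, h1]

-- ===== VERDICT (by name: the statement is the Claim_ definition above) =====
theorem calculateBinaryNumbers_spec : Claim_equal_calculateBinaryNumbers := by
  intro s _
  unfold Spec_calculateBinaryNumbers calculateBinaryNumbers calculateBinaryNumbers_alt
  by_cases hlt : PySem.Str.len s < 8
  · rw [if_pos hlt, if_pos (by omega)]
  · rw [if_neg hlt]
    by_cases hgt : PySem.Str.len s > 8
    · rw [if_pos hgt, if_pos (by omega)]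
    · rw [if_neg hgt, if_neg (by omega)]
      have hlen : (s.toList.length : Int) = 8 := by
        have := PySem.Str.len_eq s
        omega
      rw [loopA_eq_loopB s.toList 0 0 le_rfl (by omega)]
      cases loopB s.toList 0 <;> simp
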